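-- pv_equiv track=rewrite | github.com/MrTomKimber/kgontologies | src/graphloader.py | traverse_hierarchy_path
-- ===== SOURCE A (Python) =====
-- def traverse_hierarchy_path(hdict, start, acc=None):
--     # Given a dictionary containing node-to-node parental linkages {child:parent} and a start node,
--     # traverse the hierarchy and return the path taken from start node, all the way up the
--     # tree, until it reaches the (local) top.
--     if acc is None:
--         acc = [start]
--     next_value = hdict.get(start)
--     if next_value is not None :
--         acc.append(next_value)
--         traverse_hierarchy_path(hdict, next_value, acc)
--     return acc
-- ===== SOURCE B (Python) =====
-- def traverse_hierarchy_path(hdict, start, acc=None):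
--     # Collect the parent chain above start first, then attach it to the accumulator.
--     chain = []
--     cur = hdict.get(start)
--     while cur is not None:
--         chain.append(cur)
--         cur = hdict.get(cur)
--     if acc is None:
--         return [start] + chain
--     acc.extend(chain)
--     return acc
-- ===== Notes on version B (the rewrite author's own statement) =====
-- stated objective: alternative
-- what changed: B replaces A's self-recursion threading the accumulator through every call by a single iterative pass that first collects the parent chain as its own list and only then attaches it to the default [start] or extends the caller's accumulator.
import Mathlib
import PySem

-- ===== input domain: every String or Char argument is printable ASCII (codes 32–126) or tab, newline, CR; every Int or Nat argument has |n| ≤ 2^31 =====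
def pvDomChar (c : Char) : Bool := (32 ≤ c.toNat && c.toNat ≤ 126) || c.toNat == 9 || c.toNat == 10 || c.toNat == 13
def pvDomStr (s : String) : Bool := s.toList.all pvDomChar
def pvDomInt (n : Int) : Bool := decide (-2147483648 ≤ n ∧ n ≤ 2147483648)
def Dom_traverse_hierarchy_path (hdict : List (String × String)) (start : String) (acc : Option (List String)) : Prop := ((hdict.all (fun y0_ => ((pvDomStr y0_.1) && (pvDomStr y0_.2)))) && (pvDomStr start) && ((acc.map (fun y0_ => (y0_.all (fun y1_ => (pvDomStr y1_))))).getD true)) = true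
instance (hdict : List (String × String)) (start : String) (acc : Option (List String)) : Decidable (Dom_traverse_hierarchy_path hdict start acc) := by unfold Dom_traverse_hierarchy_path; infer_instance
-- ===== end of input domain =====

-- ===== PORT A =====
-- One honest line: B collects the parent chain as a separate list first and then attaches it
-- to the accumulator, instead of A's self-recursion threading acc through every call; return-value
-- equivalence only (both Pythons mutate a caller-supplied acc in place in the same way).
-- Loop body of A: while a parent exists, append it and recurse. Fuel hdict.length + 1 is enough
-- on every input admitted by Pre_ (the chain escapes the key set within hdict.length steps).
def pvGoA (d : PySem.Dict String String) : Nat → String → List String → List String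
  | 0, _, acc => acc
  | fuel + 1, cur, acc =>
    match PySem.Dict.get? d cur with
    | none => acc
    | some nv => pvGoA d fuel nv (acc ++ [nv])

def traverse_hierarchy_path (hdict : List (String × String)) (start : String) (acc : Option (List String)) : List String :=
  let acc0 := acc.getD [start]
  pvGoA (PySem.Dict.ofList hdict) (hdict.length + 1) start acc0

-- ===== PORT B =====
-- the while-loop of B: collect successive parents into their own list
def pvChainB (d : PySem.Dict String String) : Nat → Option String → List String
  | 0, _ => []
  | _ + 1, none => []
  | fuel + 1, some v => v :: pvChainB d fuel (PySem.Dict.get? d v)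

def traverse_hierarchy_path_alt (hdict : List (String × String)) (start : String) (acc : Option (List String)) : List String :=
  let d := PySem.Dict.ofList hdict
  let chain := pvChainB d (hdict.length + 1) (PySem.Dict.get? d start)
  match acc with
  | none => [start] ++ chain
  | some a => a ++ chain

-- ===== PRECONDITION & SPEC =====
-- Pre_ excludes exactly the inputs on which Python A never returns: a cycle in the parent chain
-- reachable from start (the chain must leave the key set within hdict.length lookups).
def Pre_traverse_hierarchy_path (hdict : List (String × String)) (start : String) (acc : Option (List String)) : Prop :=
  (fun o => Option.bind o (PySem.Dict.get? (PySem.Dict.ofList hdict)))^[hdict.length + 1] (some start) = none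

instance (hdict : List (String × String)) (start : String) (acc : Option (List String)) : Decidable (Pre_traverse_hierarchy_path hdict start acc) := by unfold Pre_traverse_hierarchy_path; infer_instance

def pvWitness_traverse_hierarchy_path : (List (String × String)) × String × Option (List String) :=
  ([("a", "b"), ("b", "c")], "a", none)

def Spec_traverse_hierarchy_path (hdict : List (String × String)) (start : String) (acc : Option (List String)) (out : List String) : Prop := out = traverse_hierarchy_path_alt hdict start acc
instance (hdict : List (String × String)) (start : String) (acc : Option (List String)) (out : List String) : Decidable (Spec_traverse_hierarchy_path hdict start acc out) := by unfold Spec_traverse_hierarchy_path; infer_instance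

-- ===== CLAIM (what is proved, stated in full; the proofs are below) =====
def Claim_equal_traverse_hierarchy_path : Prop := ∀ (hdict : List (String × String)) (start : String) (acc : Option (List String)), Dom_traverse_hierarchy_path hdict start acc → Pre_traverse_hierarchy_path hdict start acc → Spec_traverse_hierarchy_path hdict start acc (traverse_hierarchy_path hdict start acc)

-- ===== LEMMAS AND PROOFS =====
-- A's recursion with accumulator equals the accumulator followed by B's collected chain.
theorem pvGoA_eq_append_chain (d : PySem.Dict String String) :
    ∀ (fuel : Nat) (cur : String) (acc : List String),
      pvGoA d fuel cur acc = acc ++ pvChainB d fuel (PySem.Dict.get? d cur) := by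
  intro fuel
  induction fuel with
  | zero => intro cur acc; simp [pvGoA, pvChainB]
  | succ n ih =>
    intro cur acc
    cases h : PySem.Dict.get? d cur with
    | none => simp [pvGoA, pvChainB, h]
    | some nv => simp [pvGoA, pvChainB, h, ih]

-- ===== VERDICT (by name: the statement is the Claim_ definition above) =====
theorem traverse_hierarchy_path_spec : Claim_equal_traverse_hierarchy_path := by
  intro hdict start acc _ _
  unfold Spec_traverse_hierarchy_path traverse_hierarchy_path traverse_hierarchy_path_alt
  cases acc with
  | none => simp [Option.getD, pvGoA_eq_append_chain]
  | some a => simp [Option.getD, pvGoA_eq_append_chain]
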